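-- pv_equiv track=rewrite | github.com/piravelha/compy | compy.py | _increment_location
-- ===== SOURCE A (Python) =====
-- def _increment_location(
--                         line: int,
--                         column: int,
--                         whole: str
--                         ) -> tuple[int, int]:
--   for char in whole:
--     if char == "\n":
--       line += 1
--       column = 1
--     else:
--       column += 1
--
--   return line, column
-- ===== SOURCE B (Python) =====
-- def _increment_location(line, column, whole):
--     n = whole.count("\n")
--     if n == 0:
--         return line, column + len(whole)
--     return line + n, len(whole) - whole.rfind("\n")
-- ===== Notes on version B (the rewrite author's own statement) =====
-- stated objective: simpler
-- what changed: Replaced the per-character accumulating loop with string library operations: the line advances by whole.count('\n') and the column comes from a closed-form expression over len(whole) and whole.rfind('\n'); the C-level str methods make it measurably faster by a constant factor.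
import Mathlib
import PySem

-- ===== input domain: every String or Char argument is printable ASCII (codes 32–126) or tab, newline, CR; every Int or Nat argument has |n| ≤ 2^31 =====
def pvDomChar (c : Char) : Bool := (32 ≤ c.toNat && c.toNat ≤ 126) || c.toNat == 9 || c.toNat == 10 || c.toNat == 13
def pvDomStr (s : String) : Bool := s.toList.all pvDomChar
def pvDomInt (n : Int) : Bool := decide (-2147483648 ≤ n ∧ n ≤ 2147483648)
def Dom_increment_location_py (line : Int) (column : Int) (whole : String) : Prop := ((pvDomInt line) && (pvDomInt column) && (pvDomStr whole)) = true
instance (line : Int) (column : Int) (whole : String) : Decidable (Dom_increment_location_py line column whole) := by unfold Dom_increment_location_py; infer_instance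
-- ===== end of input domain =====

-- B replaces A's char-by-char accumulating loop by string library calls: count("\n") for the
-- line increment and a closed-form column from rfind("\n") (objective: simpler).

-- ===== PORT A =====
-- for char in whole: if char == "\n": line += 1; column = 1 else: column += 1
def increment_location_py (line : Int) (column : Int) (whole : String) : Int × Int :=
  whole.toList.foldl
    (fun (st : Int × Int) char =>
      if char == '\n' then (st.1 + 1, 1) else (st.1, st.2 + 1))
    (line, column)

-- ===== PORT B =====
def increment_location_py_alt (line : Int) (column : Int) (whole : String) : Int × Int :=
  let n : Nat := PySem.Str.count whole "\n"
  if n == 0 then (line, column + PySem.Str.len whole)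
  else (line + (n : Int), PySem.Str.len whole - PySem.Str.rfind whole "\n")

-- ===== PRECONDITION & SPEC =====
def Spec_increment_location_py (line : Int) (column : Int) (whole : String) (out : Int × Int) : Prop := out = increment_location_py_alt line column whole
instance (line : Int) (column : Int) (whole : String) (out : Int × Int) : Decidable (Spec_increment_location_py line column whole out) := by unfold Spec_increment_location_py; infer_instance

-- ===== CLAIM (what is proved, stated in full; the proofs are below) =====
def Claim_equal_increment_location_py : Prop := ∀ (line : Int) (column : Int) (whole : String), Dom_increment_location_py line column whole → Spec_increment_location_py line column whole (increment_location_py line column whole)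

-- ===== LEMMAS AND PROOFS =====

-- definitional unfoldings of the PySem helpers (go is compiled by brecOn; these are rfl)
theorem countgo_cons (f : Nat) (h : Char) (t : List Char) (acc : Nat) :
    PySem.Chars.count.go ['\n'] (f + 1) (h :: t) acc =
      (if ['\n'].isPrefixOf (h :: t) then PySem.Chars.count.go ['\n'] f t (acc + 1)
       else PySem.Chars.count.go ['\n'] f t acc) := rfl

theorem countgo_nil (f acc : Nat) (sub : List Char) :
    PySem.Chars.count.go sub f [] acc = acc := by cases f <;> rfl

theorem rfindgo_succ (s sub : List Char) (j : Nat) :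
    PySem.Chars.rfind.go s sub (j + 1) =
      (if sub.isPrefixOf (List.drop (j + 1) s) then ((j : Int) + 1)
       else PySem.Chars.rfind.go s sub j) := rfl

theorem rfindgo_zero (s sub : List Char) :
    PySem.Chars.rfind.go s sub 0 = (if sub.isPrefixOf s then 0 else -1) := rfl

-- a single-char pattern ['\n'] is a prefix iff the head is '\n'
theorem prefix_nl_append_singleton (xs : List Char) (c : Char) (hc : c ≠ '\n') :
    List.isPrefixOf ['\n'] (xs ++ [c]) = List.isPrefixOf ['\n'] xs := by
  cases xs with
  | nil => simp [List.isPrefixOf]; exact fun h => hc h.symm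
  | cons h t => simp [List.isPrefixOf]

-- count.go with enough fuel counts the occurrences of '\n'
theorem countgo_nl (l : List Char) : ∀ (fuel acc : Nat), l.length ≤ fuel →
    PySem.Chars.count.go ['\n'] fuel l acc = acc + l.count '\n' := by
  induction l with
  | nil => intro fuel acc _; simp [countgo_nil]
  | cons h t ih =>
    intro fuel acc hf
    cases fuel with
    | zero => simp at hf
    | succ f =>
      rw [countgo_cons]
      simp only [List.length_cons, Nat.succ_le_succ_iff] at hf
      by_cases hh : h = '\n'
      · subst hh
        simp only [List.isPrefixOf, beq_self_eq_true, Bool.and_eq_true,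
          List.isPrefixOf_nil_left, and_self, if_true, List.count_cons_self]
        rw [ih f (acc + 1) hf]; omega
      · have hp : List.isPrefixOf ['\n'] (h :: t) = false := by
          simp [List.isPrefixOf]; exact fun h' => hh h'.symm
        rw [hp]
        simp only [Bool.false_eq_true, if_false]
        rw [ih f acc hf, List.count_cons_of_ne (by simpa using hh)]

theorem count_nl (l : List Char) : PySem.Chars.count l ['\n'] = l.count '\n' := by
  unfold PySem.Chars.count
  simp only [List.isEmpty_cons, Bool.false_eq_true, if_false]
  simpa using countgo_nl l l.length 0 le_rfl

-- appending a non-newline char does not change any check at indices ≤ |l|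
theorem rfindgo_append (l : List Char) (c : Char) (hc : c ≠ '\n') :
    ∀ j, j ≤ l.length →
    PySem.Chars.rfind.go (l ++ [c]) ['\n'] j = PySem.Chars.rfind.go l ['\n'] j := by
  intro j
  induction j with
  | zero =>
    intro _
    rw [rfindgo_zero, rfindgo_zero, prefix_nl_append_singleton l c hc]
  | succ j ih =>
    intro hj
    rw [rfindgo_succ, rfindgo_succ,
      List.drop_append_of_le_length hj, prefix_nl_append_singleton _ c hc, ih (by omega)]

theorem rfind_append_nl (l : List Char) :
    PySem.Chars.rfind (l ++ ['\n']) ['\n'] = (l.length : Int) := by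
  unfold PySem.Chars.rfind
  rw [List.length_append, List.length_singleton, rfindgo_succ]
  have h1 : List.drop (l.length + 1) (l ++ ['\n']) = [] := by simp
  rw [h1]
  simp only [List.isPrefixOf, Bool.false_eq_true, if_false]
  cases hl : l.length with
  | zero =>
    have : l = [] := List.eq_nil_of_length_eq_zero hl
    subst this
    simp [rfindgo_zero, List.isPrefixOf]
  | succ m =>
    rw [rfindgo_succ]
    have h2 : List.drop (m + 1) (l ++ ['\n']) = ['\n'] := by
      have hd : List.drop (m + 1) l = [] := List.drop_eq_nil_of_le (by omega)
      rw [List.drop_append_of_le_length (by omega), hd]; rfl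
    rw [h2]
    simp [List.isPrefixOf]

theorem rfind_append_other (l : List Char) (c : Char) (hc : c ≠ '\n') :
    PySem.Chars.rfind (l ++ [c]) ['\n'] = PySem.Chars.rfind l ['\n'] := by
  unfold PySem.Chars.rfind
  rw [List.length_append, List.length_singleton, rfindgo_succ]
  have h1 : List.drop (l.length + 1) (l ++ [c]) = [] := by simp
  rw [h1]
  simp only [List.isPrefixOf, Bool.false_eq_true, if_false]
  exact rfindgo_append l c hc l.length le_rfl

-- the loop of A, characterised in closed form
theorem key_lemma (l : List Char) : ∀ (line column : Int),
    l.foldl (fun (st : Int × Int) char =>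
        if char == '\n' then (st.1 + 1, 1) else (st.1, st.2 + 1)) (line, column) =
      (if l.count '\n' = 0 then (line, column + (l.length : Int))
       else (line + (l.count '\n' : Int), (l.length : Int) - PySem.Chars.rfind l ['\n'])) := by
  induction l using List.reverseRecOn with
  | nil => intro line column; simp
  | append_singleton l c ih =>
    intro line column
    rw [List.foldl_append, List.foldl_cons, List.foldl_nil, ih line column]
    by_cases hc : c = '\n'
    · subst hc
      rw [rfind_append_nl l]
      by_cases h0 : l.count '\n' = 0 <;>
        · simp [h0, List.count_append]
          try (push_cast; ring_nf)
    · have hb : (c == '\n') = false := by simpa using hc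
      rw [rfind_append_other l c hc]
      have hcnt : (l ++ [c]).count '\n' = l.count '\n' := by
        rw [List.count_append]; simp [List.count_singleton, hb]
      by_cases h0 : l.count '\n' = 0 <;>
        · simp [h0, hcnt, hb]
          try (push_cast; ring_nf)

-- ===== VERDICT (by name: the statement is the Claim_ definition above) =====
theorem increment_location_py_spec : Claim_equal_increment_location_py := by
  intro line column whole _
  unfold Spec_increment_location_py increment_location_py increment_location_py_alt
  rw [key_lemma whole.toList line column]
  have hc : PySem.Str.count whole "\n" = whole.toList.count '\n' := by
    unfold PySem.Str.count
    have h : ("\n" : String).toList = ['\n'] := rfl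
    rw [h, count_nl]
  have hr : PySem.Str.rfind whole "\n" = PySem.Chars.rfind whole.toList ['\n'] := rfl
  have hl : PySem.Str.len whole = (whole.toList.length : Int) := by
    simp [PySem.Str.len]
  simp only [hc, hr, hl]
  by_cases h0 : whole.toList.count '\n' = 0 <;> simp [h0]
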